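-- pv_equiv track=rewrite | github.com/fabi200123/Drug-Repurposing-Benchmark | benchmark/benchmark.py | benchmark_atc_comparison
-- ===== SOURCE A (Python) =====
-- ALL_ATC_CODES = [
--     "V", "M", "D", "B", "S", "N", "L", "G", "J", "P", "A", "R", "C", "H"
-- ]
--
-- def benchmark_atc_comparison(reference, output):
--     score = 0
--
--     for code in ALL_ATC_CODES:
--         reference_set = set(reference.get(code, []))
--         output_set = set(output.get(code, []))
--
--         # Add +1 for correctly matched drugs
--         correct_matches = reference_set & output_set
--         score += len(correct_matches)
--
--         # Subtract -1 for incorrect drugs in the output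
--         incorrect_matches = output_set - reference_set
--         score -= len(incorrect_matches)
--
--         # # Subtract -1 for missing drugs in the output
--         # missing_matches = reference_set - output_set
--         # score -= len(missing_matches)
--
--     return score
-- ===== SOURCE B (Python) =====
-- ALL_ATC_CODES = [
--     "V", "M", "D", "B", "S", "N", "L", "G", "J", "P", "A", "R", "C", "H"
-- ]
--
-- def benchmark_atc_comparison(reference, output):
--     # Flatten both mappings into global sets of (code, drug) pairs, then use
--     # the identity  score = 2*|out & ref| - |out|  (matched pairs count +1,
--     # unmatched output pairs count -1, so total = matched - (|out| - matched)).
--     ref_pairs = {(code, drug) for code in ALL_ATC_CODES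
--                  for drug in reference.get(code, [])}
--     out_pairs = {(code, drug) for code in ALL_ATC_CODES
--                  for drug in output.get(code, [])}
--     return 2 * len(out_pairs & ref_pairs) - len(out_pairs)
-- ===== Notes on version B (the rewrite author's own statement) =====
-- stated objective: alternative
-- what changed: Replaces A's per-code loop that accumulates |reference_set & output_set| - |output_set - reference_set| with a flat representation: both mappings are flattened once into global sets of (code, drug) pairs and the score is computed by the single closed formula 2*|out_pairs & ref_pairs| - |out_pairs|, with no per-code accumulator and no difference set.
import Mathlib
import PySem

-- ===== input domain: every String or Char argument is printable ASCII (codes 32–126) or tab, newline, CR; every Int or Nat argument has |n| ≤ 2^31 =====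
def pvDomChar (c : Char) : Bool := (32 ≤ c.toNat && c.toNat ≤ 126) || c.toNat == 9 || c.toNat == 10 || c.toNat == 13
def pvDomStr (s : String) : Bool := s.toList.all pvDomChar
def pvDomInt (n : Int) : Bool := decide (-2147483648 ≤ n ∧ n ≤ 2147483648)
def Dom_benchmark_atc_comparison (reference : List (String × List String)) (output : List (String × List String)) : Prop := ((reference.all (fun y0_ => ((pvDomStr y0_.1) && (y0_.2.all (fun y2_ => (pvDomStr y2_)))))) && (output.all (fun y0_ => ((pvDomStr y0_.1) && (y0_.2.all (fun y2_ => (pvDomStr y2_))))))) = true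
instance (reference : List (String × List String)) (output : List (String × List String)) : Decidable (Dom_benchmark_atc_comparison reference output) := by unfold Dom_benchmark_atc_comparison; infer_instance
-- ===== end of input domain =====

-- B flattens both mappings into global sets of (code, drug) pairs and computes the score by the
-- single closed formula 2*|out ∩ ref| − |out|, instead of A's per-code set algebra with a running
-- accumulator (alternative decomposition; same cost).
-- ===== PORT A =====
def pvAllAtcCodes : List String :=
  ["V", "M", "D", "B", "S", "N", "L", "G", "J", "P", "A", "R", "C", "H"]

def benchmark_atc_comparison (reference : List (String × List String)) (output : List (String × List String)) : Int :=
  pvAllAtcCodes.foldl (fun score code =>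
    let referenceSet := PySem.Set.ofList ((PySem.Dict.mk reference).getD code [])
    let outputSet := PySem.Set.ofList ((PySem.Dict.mk output).getD code [])
    let score := score + PySem.Set.len (PySem.Set.inter referenceSet outputSet)
    score - PySem.Set.len (PySem.Set.diff outputSet referenceSet)) 0

-- ===== PORT B =====
def benchmark_atc_comparison_alt (reference : List (String × List String)) (output : List (String × List String)) : Int :=
  let refPairs : PySem.Set (String × String) :=
    PySem.Set.ofList (pvAllAtcCodes.flatMap (fun code =>
      ((PySem.Dict.mk reference).getD code []).map (fun drug => (code, drug))))
  let outPairs : PySem.Set (String × String) :=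
    PySem.Set.ofList (pvAllAtcCodes.flatMap (fun code =>
      ((PySem.Dict.mk output).getD code []).map (fun drug => (code, drug))))
  2 * PySem.Set.len (PySem.Set.inter outPairs refPairs) - PySem.Set.len outPairs

-- ===== PRECONDITION & SPEC =====
def Spec_benchmark_atc_comparison (reference : List (String × List String)) (output : List (String × List String)) (out : Int) : Prop := out = benchmark_atc_comparison_alt reference output
instance (reference : List (String × List String)) (output : List (String × List String)) (out : Int) : Decidable (Spec_benchmark_atc_comparison reference output out) := by unfold Spec_benchmark_atc_comparison; infer_instance

-- ===== CLAIM (what is proved, stated in full; the proofs are below) =====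
def Claim_equal_benchmark_atc_comparison : Prop := ∀ (reference : List (String × List String)) (output : List (String × List String)), Dom_benchmark_atc_comparison reference output → Spec_benchmark_atc_comparison reference output (benchmark_atc_comparison reference output)

-- ===== LEMMAS AND PROOFS =====

theorem pv_foldl_add_eq {α : Type} [BEq α] [LawfulBEq α] (xs : List α) (s : List α) :
    List.foldl PySem.Set.add s xs
      = s ++ (PySem.Set.ofList xs).filter (fun x => !s.contains x) := by
  induction xs generalizing s with
  | nil => simp [PySem.Set.ofList, PySem.Set.empty]
  | cons x xs ih =>
    have hx : PySem.Set.ofList (x :: xs)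
        = [x] ++ (PySem.Set.ofList xs).filter (fun a => !([x].contains a)) := by
      show List.foldl PySem.Set.add PySem.Set.empty (x :: xs) = _
      rw [List.foldl_cons]
      have : PySem.Set.add PySem.Set.empty x = [x] := by
        simp [PySem.Set.add, PySem.Set.empty]
      rw [this, ih]
    rw [List.foldl_cons, ih, hx]
    by_cases h : x ∈ s
    · have hadd : PySem.Set.add s x = s := by simp [PySem.Set.add, h]
      rw [hadd]
      simp only [List.filter_append, List.filter_filter]
      congr 1
      have h1 : List.filter (fun a => !s.contains a) [x] = [] := by simp [h]
      rw [h1, List.nil_append]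
      apply List.filter_congr
      intro a _
      by_cases hax : a = x <;> simp [hax, h]
    · have hadd : PySem.Set.add s x = s ++ [x] := by simp [PySem.Set.add, h]
      rw [hadd]
      simp only [List.filter_append, List.filter_filter, List.append_assoc]
      congr 1
      have h1 : List.filter (fun a => !s.contains a) [x] = [x] := by simp [h]
      rw [h1]
      congr 1
      apply List.filter_congr
      intro a _
      by_cases hax : a = x <;> simp [hax, h]

theorem pv_ofList_append_disjoint {α : Type} [BEq α] [LawfulBEq α] (xs ys : List α)
    (h : ∀ a ∈ ys, a ∉ xs) :
    PySem.Set.ofList (xs ++ ys) = PySem.Set.ofList xs ++ PySem.Set.ofList ys := by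
  show List.foldl PySem.Set.add PySem.Set.empty (xs ++ ys) = _
  rw [List.foldl_append]
  rw [pv_foldl_add_eq]
  congr 1
  apply List.filter_eq_self.mpr
  intro a ha
  have hni := h a ((PySem.Set.mem_ofList ys a).mp ha)
  have h2 : a ∉ List.foldl PySem.Set.add PySem.Set.empty xs :=
    fun hm => hni ((PySem.Set.mem_ofList xs a).mp hm)
  simpa using h2

theorem pv_foldl_add_map {α β : Type} [BEq α] [LawfulBEq α] [BEq β] [LawfulBEq β]
    (f : α → β) (hf : Function.Injective f) (xs : List α) (t : List α) :
    List.foldl PySem.Set.add (t.map f) (xs.map f) = (List.foldl PySem.Set.add t xs).map f := by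
  induction xs generalizing t with
  | nil => simp
  | cons x xs ih =>
    simp only [List.map_cons, List.foldl_cons]
    by_cases h : x ∈ t
    · have hfm : f x ∈ t.map f := List.mem_map_of_mem h
      have hstep : PySem.Set.add (t.map f) (f x) = (PySem.Set.add t x).map f := by
        simp [PySem.Set.add, h, hfm]
      rw [hstep, ih]
    · have hfm : f x ∉ t.map f := by
        simp only [List.mem_map]
        rintro ⟨a, ha, he⟩
        exact h (hf he ▸ ha)
      have hstep : PySem.Set.add (t.map f) (f x) = (PySem.Set.add t x).map f := by
        simp [PySem.Set.add, h, hfm]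
      rw [hstep, ih]

theorem pv_ofList_map_inj {α β : Type} [BEq α] [LawfulBEq α] [BEq β] [LawfulBEq β]
    (f : α → β) (hf : Function.Injective f) (xs : List α) :
    PySem.Set.ofList (xs.map f) = (PySem.Set.ofList xs).map f := by
  have := pv_foldl_add_map f hf xs []
  simpa [PySem.Set.ofList, PySem.Set.empty] using this

theorem pv_ofList_flatMap_tagged (codes : List String) (h : codes.Nodup)
    (g : String → List String) :
    PySem.Set.ofList (codes.flatMap (fun c => (g c).map (fun d => (c, d))))
      = codes.flatMap (fun c => (PySem.Set.ofList (g c)).map (fun d => (c, d))) := by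
  induction codes with
  | nil => simp [PySem.Set.ofList, PySem.Set.empty]
  | cons c cs ih =>
    have hc : c ∉ cs := (List.nodup_cons.mp h).1
    have hcs : cs.Nodup := (List.nodup_cons.mp h).2
    rw [List.flatMap_cons, List.flatMap_cons]
    rw [pv_ofList_append_disjoint]
    · rw [pv_ofList_map_inj (fun d => (c, d)) (fun a b hab => congrArg Prod.snd hab), ih hcs]
    · intro p hp hpb
      have h1 : p.1 ∈ cs := by
        rcases List.mem_flatMap.mp hp with ⟨c', hc', hpc⟩
        rcases List.mem_map.mp hpc with ⟨d, _, rfl⟩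
        exact hc'
      rcases List.mem_map.mp hpb with ⟨d, _, he⟩
      rw [← he] at h1
      exact hc h1

theorem pv_filter_count_comm {α : Type} [BEq α] [LawfulBEq α] [DecidableEq α] (rs os : List α)
    (h1 : rs.Nodup) (h2 : os.Nodup) :
    (rs.filter (fun x => os.contains x)).length = (os.filter (fun x => rs.contains x)).length := by
  apply List.Perm.length_eq
  apply (List.perm_ext_iff_of_nodup (h1.filter _) (h2.filter _)).mpr
  intro x
  simp [List.mem_filter, and_comm]

theorem pv_length_filter_not {α : Type} (l : List α) (p : α → Bool) :
    (l.filter p).length + (l.filter (fun a => !p a)).length = l.length := by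
  induction l with
  | nil => simp
  | cons x l ih =>
    by_cases h : p x <;> simp [h, ← ih] <;> omega

theorem pv_foldl_sum (l : List String) (f : String → Int) (a : Int) :
    l.foldl (fun s c => s + f c) a = a + (l.map f).sum := by
  induction l generalizing a with
  | nil => simp
  | cons c l ih => rw [List.foldl_cons, ih, List.map_cons, List.sum_cons]; ring

theorem pv_sum_comb (l : List String) (k n : String → Nat) :
    (l.map (fun c => 2 * (k c : Int) - (n c : Int))).sum
      = 2 * (((l.map k).sum : Nat) : Int) - (((l.map n).sum : Nat) : Int) := by
  induction l with
  | nil => simp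
  | cons c l ih => simp [ih]; ring

theorem pv_main (R O : String → List String) (codes : List String) (hnd : codes.Nodup) :
    codes.foldl (fun score c =>
        score + PySem.Set.len (PySem.Set.inter (PySem.Set.ofList (R c)) (PySem.Set.ofList (O c)))
          - PySem.Set.len (PySem.Set.diff (PySem.Set.ofList (O c)) (PySem.Set.ofList (R c)))) 0
    = 2 * PySem.Set.len (PySem.Set.inter
          (PySem.Set.ofList (codes.flatMap (fun c => (O c).map (fun d => (c, d)))))
          (PySem.Set.ofList (codes.flatMap (fun c => (R c).map (fun d => (c, d))))))
      - PySem.Set.len (PySem.Set.ofList (codes.flatMap (fun c => (O c).map (fun d => (c, d))))) := by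
  -- k c = distinct output drugs of code c that are in reference; n c = distinct output drugs
  have hcontR : ∀ (c : String) (d : String),
      ((PySem.Set.ofList (R c)).contains d) = ((R c).contains d) := by
    intro c d
    by_cases hd : d ∈ R c <;> simp [PySem.Set.contains, hd, PySem.Set.mem_ofList]
  -- A side
  have hA : codes.foldl (fun score c =>
        score + PySem.Set.len (PySem.Set.inter (PySem.Set.ofList (R c)) (PySem.Set.ofList (O c)))
          - PySem.Set.len (PySem.Set.diff (PySem.Set.ofList (O c)) (PySem.Set.ofList (R c)))) 0
      = codes.foldl (fun s c => s +
          (2 * ((((PySem.Set.ofList (O c)).filter (fun d => (R c).contains d)).length : Int))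
            - (((PySem.Set.ofList (O c)).length : Int)))) 0 := by
    apply List.foldl_ext
    intro a c _
    have h1 : PySem.Set.len (PySem.Set.inter (PySem.Set.ofList (R c)) (PySem.Set.ofList (O c)))
        = (((PySem.Set.ofList (O c)).filter (fun d => (R c).contains d)).length : Int) := by
      simp only [PySem.Set.len, PySem.Set.inter, PySem.Set.contains]
      norm_cast
      rw [pv_filter_count_comm _ _ (PySem.Set.nodup_ofList (R c)) (PySem.Set.nodup_ofList (O c))]
      apply congrArg
      apply List.filter_congr
      intro d _
      exact hcontR c d
    have h2 : PySem.Set.len (PySem.Set.diff (PySem.Set.ofList (O c)) (PySem.Set.ofList (R c)))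
        = (((PySem.Set.ofList (O c)).length : Int))
          - (((PySem.Set.ofList (O c)).filter (fun d => (R c).contains d)).length : Int) := by
      simp only [PySem.Set.len, PySem.Set.diff, PySem.Set.contains]
      have hcomp := pv_length_filter_not (PySem.Set.ofList (O c))
        (fun d => List.contains (PySem.Set.ofList (R c)) d)
      have hpred : (PySem.Set.ofList (O c)).filter (fun d => List.contains (PySem.Set.ofList (R c)) d)
          = (PySem.Set.ofList (O c)).filter (fun d => (R c).contains d) := by
        apply List.filter_congr
        intro d _
        exact hcontR c d
      rw [hpred] at hcomp
      omega
    rw [h1, h2]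
    ring
  rw [hA]
  rw [pv_foldl_sum codes (fun c =>
      2 * ((((PySem.Set.ofList (O c)).filter (fun d => (R c).contains d)).length : Int))
        - (((PySem.Set.ofList (O c)).length : Int))) 0]
  -- B side
  rw [pv_ofList_flatMap_tagged codes hnd O]
  have hmemRef : ∀ p : String × String,
      p ∈ PySem.Set.ofList (codes.flatMap (fun c => (R c).map (fun d => (c, d))))
        ↔ p.1 ∈ codes ∧ p.2 ∈ R p.1 := by
    intro p
    rw [PySem.Set.mem_ofList]
    simp only [List.mem_flatMap, List.mem_map]
    constructor
    · rintro ⟨c, hc, d, hd, he⟩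
      rw [← he]
      exact ⟨hc, hd⟩
    · rintro ⟨h1, h2⟩
      exact ⟨p.1, h1, p.2, h2, rfl⟩
  simp only [PySem.Set.len, PySem.Set.inter, PySem.Set.contains]
  rw [List.filter_flatMap, List.length_flatMap, List.length_flatMap]
  have hmapn : (codes.map (fun c => ((PySem.Set.ofList (O c)).map (fun d => (c, d))).length))
      = codes.map (fun c => (PySem.Set.ofList (O c)).length) := by
    apply List.map_congr_left
    intro c _
    rw [List.length_map]
  have hmapk : (codes.map (fun c =>
        (((PySem.Set.ofList (O c)).map (fun d => (c, d))).filter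
          (fun p => List.contains (PySem.Set.ofList (codes.flatMap (fun c => (R c).map (fun d => (c, d))))) p)).length))
      = codes.map (fun c => ((PySem.Set.ofList (O c)).filter (fun d => (R c).contains d)).length) := by
    apply List.map_congr_left
    intro c hc
    rw [List.filter_map, List.length_map]
    apply congrArg
    apply List.filter_congr
    intro d _
    simp only [Function.comp]
    by_cases hd : d ∈ R c
    · simp [hmemRef, hc, hd]
    · simp [hmemRef, hc, hd]
  rw [hmapk, hmapn]
  rw [pv_sum_comb codes (fun c => ((PySem.Set.ofList (O c)).filter (fun d => (R c).contains d)).length)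
      (fun c => (PySem.Set.ofList (O c)).length)]
  ring

-- ===== VERDICT (by name: the statement is the Claim_ definition above) =====
theorem benchmark_atc_comparison_spec : Claim_equal_benchmark_atc_comparison := by
  intro reference output _
  unfold Spec_benchmark_atc_comparison
  show benchmark_atc_comparison reference output = benchmark_atc_comparison_alt reference output
  exact pv_main (fun c => (PySem.Dict.mk reference).getD c [])
    (fun c => (PySem.Dict.mk output).getD c []) pvAllAtcCodes (by decide)
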